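-- pv_equiv track=rewrite | github.com/WjyAlone/ACM | Freezed/test.py | func
-- ===== SOURCE A (Python) =====
-- occasion = 1
--
-- def func(lt1 :list, lt2 :list):
--   difficult_temp = 0
--   diffit = list()
--   for i in lt1:
--     for j in lt2:
--       difficult_temp+=abs(i-j)
--     diffit.append(difficult_temp)
--     difficult_temp = 0
--   if occasion % 2 != 0:
--     return diffit.index(max(diffit))
--   else:
--     return diffit.index(min(diffit))
-- ===== SOURCE B (Python) =====
-- def func(lt1: list, lt2: list):
--     s = sorted(lt2)
--     pre = [0]
--     acc = 0
--     for v in s: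
--         acc += v
--         pre.append(acc)
--     total = acc
--     m = len(s)
--
--     def cost(x):
--         # sum(|x - j| for j in lt2) via binary search + prefix sums
--         lo, hi = 0, m
--         while lo < hi:
--             mid = (lo + hi) // 2
--             if s[mid] < x:
--                 lo = mid + 1
--             else:
--                 hi = mid
--         k = lo
--         return x * k - pre[k] + (total - pre[k]) - x * (m - k)
--
--     best = cost(lt1[0])
--     best_i = 0
--     idx = 0
--     for x in lt1[1:]:
--         idx += 1
--         d = cost(x)
--         if d > best:
--             best = d
--             best_i = idx
--     return best_i
-- ===== Notes on version B (the rewrite author's own statement) =====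
-- stated objective: faster
-- what changed: Instead of recomputing sum(|i-j|) with a nested loop over lt2 for every i and then scanning with index(max(...)), B sorts lt2 once, builds prefix sums, answers each row's sum of absolute differences with one binary search in closed form, and keeps the running argmax in the same pass.
import Mathlib
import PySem

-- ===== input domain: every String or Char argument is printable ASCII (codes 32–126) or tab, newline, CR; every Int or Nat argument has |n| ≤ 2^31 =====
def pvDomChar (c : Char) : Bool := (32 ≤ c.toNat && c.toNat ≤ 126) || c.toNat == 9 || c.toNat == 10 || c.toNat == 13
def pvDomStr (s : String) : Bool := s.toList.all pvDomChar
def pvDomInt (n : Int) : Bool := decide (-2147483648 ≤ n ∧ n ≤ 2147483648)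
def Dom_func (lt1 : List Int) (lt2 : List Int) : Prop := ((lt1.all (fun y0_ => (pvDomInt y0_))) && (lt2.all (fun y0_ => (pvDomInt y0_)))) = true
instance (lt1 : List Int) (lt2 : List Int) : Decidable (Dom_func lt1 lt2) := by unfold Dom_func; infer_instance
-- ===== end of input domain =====

-- B replaces A's nested loops (full rescan of lt2 per element of lt1) by sorting lt2 once,
-- prefix sums and a binary search per element, keeping the running argmax in the same pass
-- (objective: faster; measured).

-- ===== PORT A =====
def occasion : Int := 1

def func (lt1 : List Int) (lt2 : List Int) : Int :=
  let diffit := lt1.foldl (fun acc i => acc ++ [lt2.foldl (fun t j => t + |i - j|) 0]) []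
  if occasion % 2 ≠ 0 then
    match PySem.List.max? diffit (fun y => y) with
    | some mx => ((PySem.List.index? diffit mx).getD 0 : Nat)
    | none => 0      -- Python: max([]) raises ValueError here (lt1 = []); excluded by Pre_func
  else
    match PySem.List.min? diffit (fun y => y) with
    | some mn => ((PySem.List.index? diffit mn).getD 0 : Nat)
    | none => 0      -- Python: min([]) raises ValueError here (lt1 = []); excluded by Pre_func

-- ===== PORT B =====
-- binary search loop of Source B's cost(): while lo < hi: mid = (lo+hi)//2; ... — fuel-based, fuel = len(s)
def bsLoop (s : List Int) (x : Int) : Nat → Nat → Nat → Nat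
  | 0, lo, _ => lo
  | fuel + 1, lo, hi =>
    if lo < hi then
      match s[(lo + hi) / 2]? with
      | some y => if y < x then bsLoop s x fuel ((lo + hi) / 2 + 1) hi else bsLoop s x fuel lo ((lo + hi) / 2)
      | none => lo
    else lo

-- Source B's cost(x): closed form from the bisect index k and prefix sums
def costB (s : List Int) (pre : List Int) (total : Int) (m : Nat) (x : Int) : Int :=
  let k := bsLoop s x s.length 0 m
  -- pre[k]: 0 ≤ k ≤ m = len(s) < len(pre), so pyGet? is some; getD 0 is exact
  x * (k : Int) - (PySem.List.pyGet? pre (k : Int)).getD 0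
    + (total - (PySem.List.pyGet? pre (k : Int)).getD 0) - x * ((m : Int) - (k : Int))

def func_alt (lt1 : List Int) (lt2 : List Int) : Int :=
  let s := PySem.List.sorted lt2 (fun v => v) false
  let pa := s.foldl (fun (st : List Int × Int) v => (st.1 ++ [st.2 + v], st.2 + v)) ([0], 0)
  let pre := pa.1
  let total := pa.2
  let m := s.length
  match lt1 with
  | [] => 0          -- Python: lt1[0] raises IndexError here; excluded by Pre_func
  | x0 :: rest =>
    (rest.foldl (fun (st : Int × Int × Int) x =>
        let idx := st.2.2 + 1
        let d := costB s pre total m x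
        if st.1 < d then (d, idx, idx) else (st.1, st.2.1, idx))
      (costB s pre total m x0, 0, 0)).2.1

-- ===== PRECONDITION & SPEC =====
-- Pre_ excludes only lt1 = [], on which A raises ValueError (max of an empty list).
def Pre_func (lt1 : List Int) (lt2 : List Int) : Prop := lt1 ≠ []
instance (lt1 : List Int) (lt2 : List Int) : Decidable (Pre_func lt1 lt2) := by unfold Pre_func; infer_instance
def pvWitness_func : List Int × List Int := ([3, 1], [2, 5])

def Spec_func (lt1 : List Int) (lt2 : List Int) (out : Int) : Prop := out = func_alt lt1 lt2
instance (lt1 : List Int) (lt2 : List Int) (out : Int) : Decidable (Spec_func lt1 lt2 out) := by unfold Spec_func; infer_instance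

-- ===== CLAIM (what is proved, stated in full; the proofs are below) =====
def Claim_equal_func : Prop := ∀ (lt1 : List Int) (lt2 : List Int), Dom_func lt1 lt2 → Pre_func lt1 lt2 → Spec_func lt1 lt2 (func lt1 lt2)

-- ===== LEMMAS AND PROOFS =====

-- the "row sum" both programs compute for a row value x: sum of |x - j| over lt2
def rowSum (lt2 : List Int) (x : Int) : Int := (lt2.map (fun j => |x - j|)).sum

-- partial sums of s starting from a (B's pre = 0 :: psums 0 s)
def psums (a : Int) : List Int → List Int
  | [] => []
  | v :: t => (a + v) :: psums (a + v) t

lemma inner_foldl (x : Int) (l : List Int) : ∀ t : Int,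
    l.foldl (fun t j => t + |x - j|) t = t + rowSum l x := by
  induction l with
  | nil => intro t; simp [rowSum]
  | cons v l ih => intro t; simp [rowSum, List.foldl_cons, ih, List.map_cons, List.sum_cons]; ring

lemma outer_foldl (f : Int → Int) (l : List Int) : ∀ acc : List Int,
    l.foldl (fun a i => a ++ [f i]) acc = acc ++ l.map f := by
  induction l with
  | nil => intro acc; simp
  | cons v l ih => intro acc; simp [List.foldl_cons, ih]

lemma pre_foldl (s : List Int) : ∀ (p : List Int) (a : Int),
    s.foldl (fun (st : List Int × Int) v => (st.1 ++ [st.2 + v], st.2 + v)) (p, a)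
      = (p ++ psums a s, a + s.sum) := by
  induction s with
  | nil => intro p a; simp [psums]
  | cons v s ih => intro p a; simp [List.foldl_cons, psums, ih]; ring

lemma psums_get (s : List Int) : ∀ (a : Int) (k : Nat), k ≤ s.length →
    (PySem.List.pyGet? (a :: psums a s) (k : Int)).getD 0 = a + (s.take k).sum := by
  induction s with
  | nil =>
    intro a k hk
    have : k = 0 := by simpa using hk
    subst this; simp [psums]
  | cons v s ih =>
    intro a k hk
    cases k with
    | zero => simp
    | succ k =>
      have h2 : k ≤ s.length := by simpa using hk
      have := ih (a + v) k h2
      rw [PySem.List.pyGet?_natCast] at this ⊢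
      simp only [psums, List.getElem?_cons_succ, List.take_succ_cons, List.sum_cons] at this ⊢
      rw [this]; ring

lemma bsLoop_eq_bisect (s : List Int) (x : Int) : ∀ (fuel lo hi : Nat),
    bsLoop s x fuel lo hi = PySem.List.bisectLeftLoop s x fuel lo hi := by
  intro fuel
  induction fuel with
  | zero => intro lo hi; simp [bsLoop, PySem.List.bisectLeftLoop]
  | succ n ih =>
    intro lo hi
    rw [bsLoop, PySem.List.bisectLeftLoop]
    split
    · rcases h : s[(lo + hi) / 2]? with _ | y <;> simp [ih]
    · rfl

lemma sum_abs_lt (x : Int) (l : List Int) (h : ∀ j ∈ l, j < x) :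
    (l.map (fun j => |x - j|)).sum = x * l.length - l.sum := by
  induction l with
  | nil => simp
  | cons v l ih =>
    have hv : v < x := h v (by simp)
    have := ih (fun j hj => h j (by simp [hj]))
    simp only [List.map_cons, List.sum_cons, List.length_cons, this,
      abs_of_pos (by omega : (0:Int) < x - v)]
    push_cast; ring

lemma sum_abs_ge (x : Int) (l : List Int) (h : ∀ j ∈ l, x ≤ j) :
    (l.map (fun j => |x - j|)).sum = l.sum - x * l.length := by
  induction l with
  | nil => simp
  | cons v l ih =>
    have hv : x ≤ v := h v (by simp)
    have := ih (fun j hj => h j (by simp [hj]))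
    simp only [List.map_cons, List.sum_cons, List.length_cons, this,
      abs_of_nonpos (by omega : x - v ≤ (0:Int))]
    push_cast; ring

-- B's cost() computes the row sum
lemma cost_correct (lt2 : List Int) (x : Int) :
    costB (PySem.List.sorted lt2 (fun v => v) false)
      (0 :: psums 0 (PySem.List.sorted lt2 (fun v => v) false))
      ((PySem.List.sorted lt2 (fun v => v) false).sum)
      ((PySem.List.sorted lt2 (fun v => v) false).length) x = rowSum lt2 x := by
  set s := PySem.List.sorted lt2 (fun v => v) false with hs
  have hp : List.Pairwise (fun a b => a ≤ b) s := PySem.List.sorted_pairwise lt2 (fun v => v)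
  have hbl : bsLoop s x s.length 0 s.length = PySem.List.bisectLeft s x := by
    rw [bsLoop_eq_bisect]; rfl
  obtain ⟨hkle, hlt, hge⟩ := PySem.List.bisectLeft_spec s x hp
  set k := PySem.List.bisectLeft s x with hk
  have hperm : rowSum lt2 x = rowSum s x := by
    unfold rowSum
    exact (((PySem.List.sorted_perm lt2 (fun v => v) false).map (fun j => |x - j|)).sum_eq).symm
  have hsplit : rowSum s x = rowSum (s.take k) x + rowSum (s.drop k) x := by
    unfold rowSum
    conv_lhs => rw [← List.take_append_drop k s]
    rw [List.map_append, List.sum_append]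
  have htake : rowSum (s.take k) x = x * (s.take k).length - (s.take k).sum := by
    apply sum_abs_lt
    intro j hj
    obtain ⟨i, hm, rfl⟩ := List.mem_take_iff_getElem.1 hj
    exact hlt i (by omega) (by omega)
  have hdrop : rowSum (s.drop k) x = (s.drop k).sum - x * (s.drop k).length := by
    apply sum_abs_ge
    intro j hj
    obtain ⟨i, hm, rfl⟩ := List.getElem_of_mem hj
    rw [List.getElem_drop]
    exact hge (k + i) (by simpa using (by simp at hm; omega : k + i < s.length)) (by omega)
  have hpre := psums_get s 0 k hkle
  have hlen1 : ((s.take k).length : Int) = (k : Int) := by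
    rw [List.length_take]; push_cast; omega
  have hlen2 : ((s.drop k).length : Int) = (s.length : Int) - (k : Int) := by
    rw [List.length_drop]; push_cast [hkle]; ring
  have hsum2 : (s.drop k).sum = s.sum - (s.take k).sum := by
    have := List.sum_take_add_sum_drop s k; omega
  unfold costB
  simp only [hbl, hpre]
  rw [hperm, hsplit, htake, hdrop, hlen1, hlen2, hsum2]
  ring

lemma foldl_max_max (t : List Int) : ∀ a b : Int, t.foldl max (max a b) = max a (t.foldl max b) := by
  induction t with
  | nil => intro a b; simp
  | cons v t ih => intro a b; simp only [List.foldl_cons, max_assoc, ih]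

lemma index?_some_of_mem {v : Int} {l : List Int} (h : v ∈ l) :
    ∃ j, PySem.List.index? l v = some j := by
  rcases hidx : PySem.List.index? l v with _ | j
  · exact absurd h ((PySem.List.index?_eq_none_iff _ _).1 hidx)
  · exact ⟨j, rfl⟩

-- B's single-pass argmax fold, characterised against first-index-of-max
lemma argmax_fold (r : List Int) : ∀ (b bi o : Int),
    (r.foldl (fun (st : Int × Int × Int) d =>
        if st.1 < d then (d, st.2.2 + 1, st.2.2 + 1) else (st.1, st.2.1, st.2.2 + 1))
      (b, bi, o)).2.1
    = match PySem.List.max? r (fun y => y) with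
      | none => bi
      | some m => if m ≤ b then bi else o + 1 + ((PySem.List.index? r m).getD 0 : Nat) := by
  induction r with
  | nil => intro b bi o; simp [PySem.List.max?]
  | cons d t ih =>
    intro b bi o
    rw [List.foldl_cons, PySem.List.max?_id_cons]
    by_cases hbd : b < d
    · simp only [if_pos hbd, ih]
      cases t with
      | nil =>
        simp only [List.foldl_nil]
        rw [show PySem.List.max? ([] : List Int) (fun y => y) = none from rfl,
          PySem.List.index?_cons_self]
        simp [not_le.2 hbd]
      | cons u t' =>
        rw [PySem.List.max?_id_cons]
        have hM : List.foldl max d (u :: t') = max d (List.foldl max u t') := by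
          rw [List.foldl_cons, foldl_max_max]
        set m' := List.foldl max u t' with hm'
        by_cases hmd : m' ≤ d
        · rw [hM, max_eq_left hmd, PySem.List.index?_cons_self]
          simp [hmd, not_le.2 hbd]
        · push_neg at hmd
          have hmem : m' ∈ u :: t' := PySem.List.max?_mem (PySem.List.max?_id_cons u t')
          obtain ⟨j, hj⟩ := index?_some_of_mem hmem
          have hj' : List.idxOf? m' (u :: t') = some j := by simpa using hj
          rw [hM, max_eq_right hmd.le, PySem.List.index?_cons_of_ne _ (ne_of_lt hmd), hj]
          simp [not_le.2 hmd, not_le.2 (lt_trans hbd hmd), hj']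
          ring
    · simp only [if_neg hbd, ih]
      push_neg at hbd
      cases t with
      | nil => simp [PySem.List.max?, hbd]
      | cons u t' =>
        rw [PySem.List.max?_id_cons]
        have hM : List.foldl max d (u :: t') = max d (List.foldl max u t') := by
          rw [List.foldl_cons, foldl_max_max]
        set m' := List.foldl max u t' with hm'
        by_cases hmb : m' ≤ b
        · rw [hM]
          simp [max_le hbd hmb, hmb]
        · push_neg at hmb
          have hdm : d < m' := lt_of_le_of_lt hbd hmb
          have hmem : m' ∈ u :: t' := PySem.List.max?_mem (PySem.List.max?_id_cons u t')
          obtain ⟨j, hj⟩ := index?_some_of_mem hmem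
          have hj' : List.idxOf? m' (u :: t') = some j := by simpa using hj
          rw [hM, max_eq_right hdm.le, PySem.List.index?_cons_of_ne _ (ne_of_lt hdm), hj]
          simp [not_le.2 hmb, hj']
          ring

-- A's index(max(v :: t)) equals the argmax fold's answer from state (v, 0, 0)
lemma final_eq (v : Int) (t : List Int) :
    (((PySem.List.index? (v :: t) (List.foldl max v t)).getD 0 : Nat) : Int)
    = match PySem.List.max? t (fun y => y) with
      | none => (0 : Int)
      | some m => if m ≤ v then 0 else (0 : Int) + 1 + ((PySem.List.index? t m).getD 0 : Nat) := by
  cases t with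
  | nil =>
    rw [show PySem.List.max? ([] : List Int) (fun y => y) = none from rfl]
    simp only [List.foldl_nil]
    rw [PySem.List.index?_cons_self]
    simp
  | cons u t' =>
    rw [PySem.List.max?_id_cons]
    have hM : List.foldl max v (u :: t') = max v (List.foldl max u t') := by
      rw [List.foldl_cons, foldl_max_max]
    set m' := List.foldl max u t' with hm'
    by_cases hmv : m' ≤ v
    · rw [hM, max_eq_left hmv, PySem.List.index?_cons_self]
      simp [hmv]
    · push_neg at hmv
      have hmem : m' ∈ u :: t' := PySem.List.max?_mem (PySem.List.max?_id_cons u t')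
      obtain ⟨j, hj⟩ := index?_some_of_mem hmem
      have hj' : List.idxOf? m' (u :: t') = some j := by simpa using hj
      rw [hM, max_eq_right hmv.le, PySem.List.index?_cons_of_ne _ (ne_of_lt hmv), hj]
      simp [not_le.2 hmv, hj']
      ring

theorem func_eq (lt1 lt2 : List Int) (h : lt1 ≠ []) : func lt1 lt2 = func_alt lt1 lt2 := by
  obtain ⟨x0, rest, rfl⟩ := List.exists_cons_of_ne_nil h
  unfold func func_alt
  rw [if_pos (by norm_num [occasion])]
  dsimp only
  set s := PySem.List.sorted lt2 (fun v => v) false with hs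
  rw [pre_foldl]
  simp only [List.singleton_append, zero_add]
  have hdiff : (x0 :: rest).foldl (fun acc i => acc ++ [lt2.foldl (fun t j => t + |i - j|) 0]) []
      = (x0 :: rest).map (rowSum lt2) := by
    rw [outer_foldl]
    simp only [List.nil_append]
    congr 1
    funext i
    rw [inner_foldl]; ring
  rw [hdiff]
  have hcost : ∀ x : Int, costB s (0 :: psums 0 s) s.sum s.length x = rowSum lt2 x := by
    intro x; rw [hs]; exact cost_correct lt2 x
  rw [show (rest.foldl (fun (st : Int × Int × Int) x =>
        if st.1 < costB s (0 :: psums 0 s) s.sum s.length x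
        then (costB s (0 :: psums 0 s) s.sum s.length x, st.2.2 + 1, st.2.2 + 1)
        else (st.1, st.2.1, st.2.2 + 1))
      (costB s (0 :: psums 0 s) s.sum s.length x0, 0, 0))
    = ((rest.map (rowSum lt2)).foldl (fun (st : Int × Int × Int) d =>
        if st.1 < d then (d, st.2.2 + 1, st.2.2 + 1) else (st.1, st.2.1, st.2.2 + 1))
      (rowSum lt2 x0, 0, 0)) from by
      rw [List.foldl_map, hcost]
      congr 1
      funext st x
      simp [hcost]]
  rw [argmax_fold]
  rw [List.map_cons, PySem.List.max?_id_cons]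
  exact final_eq (rowSum lt2 x0) (rest.map (rowSum lt2))

-- ===== VERDICT (by name: the statement is the Claim_ definition above) =====
theorem func_spec : Claim_equal_func := by
  intro lt1 lt2 _ hpre
  unfold Spec_func
  exact func_eq lt1 lt2 hpre
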